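-- pv_equiv track=rewrite | github.com/OpenCTI-Platform/connectors | external-import/luminar/src/luminar.py | make_relationships
-- ===== SOURCE A (Python) =====
-- from typing import Any, Dict, List, Optional, Tuple, Union
--
-- def make_relationships(records: List[Dict[str, Any]]) -> Dict[str, List[str]]:
--     """
--     Creates a dictionary mapping target references to a list of source references.
--
--     :param records: A list of relationship dictionaries, each containing 'source_ref'
--       and 'target_ref'.
--     :return: A dictionary where each key is a 'target_ref' and the value is a list of
--       associated 'source_ref' values.
--     """
--     relationships: Dict[str, List[str]] = {}
--
--     for relationship in records:
--         target_ref = relationship.get("target_ref")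
--         source_ref = relationship.get("source_ref")
--
--         if target_ref and source_ref:
--             relationships.setdefault(target_ref, []).append(source_ref)
--
--     return relationships
-- ===== SOURCE B (Python) =====
-- from typing import Any, Dict, List
--
--
-- def make_relationships(records: List[Dict[str, Any]]) -> Dict[str, List[str]]:
--     """Pipeline version: filter to valid (target, source) pairs, take the
--     distinct targets in first-occurrence order, then build each group with a
--     per-key comprehension."""
--     pairs = [
--         (t, s)
--         for t, s in ((r.get("target_ref"), r.get("source_ref")) for r in records)
--         if t and s
--     ]
--     keys = dict.fromkeys(t for t, _ in pairs)
--     return {k: [s for t, s in pairs if t == k] for k in keys}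
-- ===== Notes on version B (the rewrite author's own statement) =====
-- stated objective: alternative
-- what changed: Replaces the single-pass setdefault-scatter into dict buckets with a pipeline: filter records to valid (target, source) pairs, compute the distinct targets in first-occurrence order with dict.fromkeys, then build each group's source list by a per-key comprehension over the filtered pairs.
import Mathlib
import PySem

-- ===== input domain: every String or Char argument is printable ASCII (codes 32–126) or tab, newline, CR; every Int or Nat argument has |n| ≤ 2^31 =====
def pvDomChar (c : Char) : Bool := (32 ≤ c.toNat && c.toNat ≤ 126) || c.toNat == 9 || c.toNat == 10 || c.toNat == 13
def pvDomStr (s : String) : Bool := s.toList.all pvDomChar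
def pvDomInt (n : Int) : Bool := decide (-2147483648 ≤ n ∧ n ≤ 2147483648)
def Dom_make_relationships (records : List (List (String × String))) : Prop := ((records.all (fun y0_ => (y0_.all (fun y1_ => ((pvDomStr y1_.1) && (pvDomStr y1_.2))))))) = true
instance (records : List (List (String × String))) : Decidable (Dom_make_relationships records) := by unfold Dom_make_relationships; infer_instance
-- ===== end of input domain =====

-- B groups by a filter/distinct-keys/per-key-comprehension pipeline instead of A's
-- single-pass setdefault-scatter; same value everywhere (objective: alternative).

-- ===== PORT A =====
-- A: one pass, scattering each valid source_ref into the bucket of its target_ref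
-- (setdefault(t, []).append(s) = Dict.modify t [] (· ++ [s])); the returned dict is its items list.
def make_relationships (records : List (List (String × String))) : List (String × List String) :=
  (records.foldl
    (fun relationships relationship =>
      let target_ref := (PySem.Dict.mk relationship).get? "target_ref"
      let source_ref := (PySem.Dict.mk relationship).get? "source_ref"
      -- `if target_ref and source_ref:` — truthy = present and non-empty string
      match target_ref, source_ref with
      | some t, some s =>
          if t ≠ "" ∧ s ≠ "" then relationships.modify t [] (· ++ [s]) else relationships
      | _, _ => relationships)
    PySem.Dict.empty).items

-- ===== PORT B =====
-- B-side helper: the pair comprehension's element (some (t,s) iff both refs are truthy)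
def pvValidPair (r : List (String × String)) : Option (String × String) :=
  ((PySem.Dict.mk r).get? "target_ref").bind fun t =>
    ((PySem.Dict.mk r).get? "source_ref").bind fun s =>
      if t ≠ "" ∧ s ≠ "" then some (t, s) else none

def make_relationships_alt (records : List (List (String × String))) : List (String × List String) :=
  let pairs := records.filterMap pvValidPair
  let keys := PySem.Set.ofList (pairs.map Prod.fst)   -- dict.fromkeys: distinct, first-occurrence order
  keys.map (fun k => (k, (pairs.filter (fun p => p.1 == k)).map Prod.snd))

-- ===== PRECONDITION & SPEC =====
def Spec_make_relationships (records : List (List (String × String))) (out : List (String × List String)) : Prop := out = make_relationships_alt records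
instance (records : List (List (String × String))) (out : List (String × List String)) : Decidable (Spec_make_relationships records out) := by unfold Spec_make_relationships; infer_instance

-- ===== CLAIM (what is proved, stated in full; the proofs are below) =====
def Claim_equal_make_relationships : Prop := ∀ (records : List (List (String × String))), Dom_make_relationships records → Spec_make_relationships records (make_relationships records)

-- ===== LEMMAS AND PROOFS =====

-- A's fold over records only acts on records with a valid pair: it is the fold of the
-- bucket-update over the filtered pair list.
theorem pvFoldA_eq_fold_pairs (records : List (List (String × String)))
    (d : PySem.Dict String (List String)) :
    records.foldl
      (fun relationships relationship =>
        let target_ref := (PySem.Dict.mk relationship).get? "target_ref"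
        let source_ref := (PySem.Dict.mk relationship).get? "source_ref"
        match target_ref, source_ref with
        | some t, some s =>
            if t ≠ "" ∧ s ≠ "" then relationships.modify t [] (· ++ [s]) else relationships
        | _, _ => relationships)
      d
    = (records.filterMap pvValidPair).foldl
        (fun d p => d.modify p.1 [] (· ++ [p.2])) d := by
  induction records generalizing d with
  | nil => rfl
  | cons r rs ih =>
    simp only [List.foldl_cons, List.filterMap_cons]
    have hstep :
        (match (PySem.Dict.mk r).get? "target_ref", (PySem.Dict.mk r).get? "source_ref" with
         | some t, some s =>
             if t ≠ "" ∧ s ≠ "" then d.modify t [] (· ++ [s]) else d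
         | _, _ => d)
        = (match pvValidPair r with
           | some p => d.modify p.1 [] (· ++ [p.2])
           | none => d) := by
      unfold pvValidPair
      cases h1 : (PySem.Dict.mk r).get? "target_ref" with
      | none => simp
      | some t =>
        cases h2 : (PySem.Dict.mk r).get? "source_ref" with
        | none => simp
        | some s => by_cases h : t ≠ "" ∧ s ≠ "" <;> simp [h]
    rw [hstep]
    cases hp : pvValidPair r with
    | none => simpa using ih d
    | some p => simp only [List.foldl_cons]; exact ih _

theorem make_relationships_eq_alt (records : List (List (String × String))) :
    make_relationships records = make_relationships_alt records := by
  unfold make_relationships make_relationships_alt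
  rw [pvFoldA_eq_fold_pairs]
  set pairs := records.filterMap pvValidPair with hpairs
  have hnd : (pairs.foldl (fun d p => d.modify p.1 [] (· ++ [p.2])) PySem.Dict.empty).keys.Nodup := by
    exact PySem.Dict.nodup_keys_foldl_modify_key pairs Prod.fst [] (fun d p => (· ++ [p.2]))
      PySem.Dict.empty (by simp)
  have hkeys : (pairs.foldl (fun d p => d.modify p.1 [] (· ++ [p.2])) PySem.Dict.empty).keys
      = PySem.Set.ofList (pairs.map Prod.fst) := by
    rw [PySem.Dict.keys_foldl_modify_key pairs Prod.fst [] (fun d p => (· ++ [p.2]))]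
    simp [PySem.Set.update_nil_left]
  rw [PySem.Dict.items_eq_map_keys _ hnd [], hkeys]
  refine List.map_congr_left (fun k _ => ?_)
  rw [PySem.Dict.getD_foldl_modify_append]
  simp

-- ===== VERDICT (by name: the statement is the Claim_ definition above) =====
theorem make_relationships_spec : Claim_equal_make_relationships := by
  intro records _
  unfold Spec_make_relationships
  exact make_relationships_eq_alt records
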